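-- pv_equiv track=rewrite | github.com/milenspasov/soft-dev-11b | Homeworks/Homework 1/Kristian Kirchev/3_third.py | find
-- ===== SOURCE A (Python) =====
-- shifur = [['T', 'U', 'E', 'S', 'A'],
--           ['B', 'C', 'D', 'F', 'G'],
--           ['H', 'I', 'K', 'L', 'M'],
--           ['N', 'O', 'P', 'Q', 'R'],
--           ['V', 'W', 'X', 'Y', 'Z']]
--
-- def find(l1, l2, shifur):
--     coords = [[], []]
--
--     for i in range(0, 5):
--         for j in range(0, 5):
--             if(shifur[i][j] == l1):
--                 coords[0] = [i, j]
--
--             if(shifur[i][j] == l2):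
--                 coords[1] = [i, j]
--
--     return coords
-- ===== SOURCE B (Python) =====
-- def find(l1, l2, shifur):
--     # Flatten the 5x5 grid row-major, then answer each letter by a backward
--     # search for its last occurrence, recovering coordinates with divmod.
--     flat = [shifur[i][j] for i in range(5) for j in range(5)]
--
--     def locate(letter):
--         for k in range(24, -1, -1):
--             if flat[k] == letter:
--                 return [k // 5, k % 5]
--         return []
--
--     return [locate(l1), locate(l2)]
-- ===== Notes on version B (the rewrite author's own statement) =====
-- stated objective: alternative
-- what changed: B flattens the grid into a 25-cell row-major list and locates each letter by an independent backward linear search (returning the last occurrence directly, with divmod recovering row/column), instead of A's forward scan maintaining a two-slot coords accumulator with last-write-wins updates.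
import Mathlib
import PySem

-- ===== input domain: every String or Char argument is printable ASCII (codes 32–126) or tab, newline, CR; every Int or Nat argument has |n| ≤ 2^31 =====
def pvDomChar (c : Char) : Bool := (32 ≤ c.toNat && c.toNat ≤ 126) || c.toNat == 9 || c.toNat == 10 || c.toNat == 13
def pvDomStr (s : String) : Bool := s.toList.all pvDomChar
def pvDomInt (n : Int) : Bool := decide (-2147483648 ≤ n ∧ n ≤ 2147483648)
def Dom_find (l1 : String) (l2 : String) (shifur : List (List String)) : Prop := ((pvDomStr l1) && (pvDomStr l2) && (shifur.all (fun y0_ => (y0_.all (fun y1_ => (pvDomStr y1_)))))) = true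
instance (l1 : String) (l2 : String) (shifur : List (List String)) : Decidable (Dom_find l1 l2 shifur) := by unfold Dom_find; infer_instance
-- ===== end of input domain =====

-- B flattens the grid row-major and locates each letter by a backward search (last occurrence + divmod) instead of A's forward two-slot scan (alternative; same cost).


-- ===== PORT A =====
-- shifur[i][j] ported as pyGetD; exact under Pre_find (all indexes 0..4 in range)
def find (l1 : String) (l2 : String) (shifur : List (List String)) : List (List Int) :=
  let coords := (PySem.List.pyRange 0 5 1).foldl (fun coords i =>
    (PySem.List.pyRange 0 5 1).foldl (fun (coords : List Int × List Int) j =>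
      let cell := PySem.List.pyGetD (PySem.List.pyGetD shifur i []) j ""
      let coords := if cell == l1 then ([i, j], coords.2) else coords
      if cell == l2 then (coords.1, [i, j]) else coords) coords) (([] : List Int), ([] : List Int))
  [coords.1, coords.2]

-- ===== PORT B =====
-- flat = [shifur[i][j] for i in range(5) for j in range(5)]; locate scans range(24,-1,-1)
-- (loop with early return ported as find?); divmod recovered with floordiv/mod
def find_alt (l1 : String) (l2 : String) (shifur : List (List String)) : List (List Int) :=
  let flat := (PySem.List.pyRange 0 5 1).flatMap (fun i =>
    (PySem.List.pyRange 0 5 1).map (fun j =>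
      PySem.List.pyGetD (PySem.List.pyGetD shifur i []) j ""))
  let locate := fun (letter : String) =>
    match (PySem.List.pyRange 24 (-1) (-1)).find? (fun k => PySem.List.pyGetD flat k "" == letter) with
    | some k => [PySem.Int.floordiv k 5, PySem.Int.mod k 5]
    | none => ([] : List Int)
  [locate l1, locate l2]

-- ===== PRECONDITION & SPEC =====
-- Pre_find excludes exactly the grids on which the Python A raises IndexError:
-- it reads shifur[i][j] for all 0 ≤ i, j < 5, so the grid needs at least 5 rows, each of the first 5 with at least 5 cells.
def Pre_find (l1 : String) (l2 : String) (shifur : List (List String)) : Prop :=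
  5 ≤ shifur.length ∧ ∀ row ∈ shifur.take 5, 5 ≤ row.length
instance (l1 : String) (l2 : String) (shifur : List (List String)) : Decidable (Pre_find l1 l2 shifur) := by unfold Pre_find; infer_instance

def pvWitness_find : String × String × List (List String) :=
  ("A", "K", [["T", "U", "E", "S", "A"], ["B", "C", "D", "F", "G"], ["H", "I", "K", "L", "M"],
              ["N", "O", "P", "Q", "R"], ["V", "W", "X", "Y", "Z"]])

def Spec_find (l1 : String) (l2 : String) (shifur : List (List String)) (out : List (List Int)) : Prop := out = find_alt l1 l2 shifur
instance (l1 : String) (l2 : String) (shifur : List (List String)) (out : List (List Int)) : Decidable (Spec_find l1 l2 shifur out) := by unfold Spec_find; infer_instance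

-- ===== CLAIM (what is proved, stated in full; the proofs are below) =====
def Claim_equal_find : Prop := ∀ (l1 : String) (l2 : String) (shifur : List (List String)), Dom_find l1 l2 shifur → Pre_find l1 l2 shifur → Spec_find l1 l2 shifur (find l1 l2 shifur)

-- ===== LEMMAS AND PROOFS =====

-- a nested fold over two index ranges is a fold over the flattened pair list
theorem foldl_foldl_flatMap {σ : Type} (f : σ → Int × Int → σ) (xs ys : List Int) :
    ∀ (init : σ),
      xs.foldl (fun s i => ys.foldl (fun s j => f s (i, j)) s) init
        = (xs.flatMap (fun i => ys.map (fun j => (i, j)))).foldl f init := by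
  induction xs with
  | nil => intro init; rfl
  | cons x xs ih =>
      intro init
      simp [List.flatMap_cons, List.foldl_append, List.foldl_map, ih]

-- a fold of a componentwise conditional pair update splits into two independent folds
theorem fold_prod_split {α : Type} (P Q : α → Bool) (u w : α → List Int) :
    ∀ (xs : List α) (s t : List Int),
      xs.foldl (fun c p => (if P p then u p else c.1, if Q p then w p else c.2)) (s, t)
        = (xs.foldl (fun a p => if P p then u p else a) s,
           xs.foldl (fun a p => if Q p then w p else a) t) := by
  intro xs
  induction xs with
  | nil => intro s t; rfl
  | cons x xs ih => intro s t; simp only [List.foldl_cons]; exact ih _ _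

-- forward last-write-wins fold = first match of the reversed list
theorem foldl_ite_eq_find?_reverse {α β : Type} (P : α → Bool) (f : α → β) :
    ∀ (xs : List α) (d : β),
      xs.foldl (fun a p => if P p then f p else a) d
        = ((xs.reverse.find? P).map f).getD d := by
  intro xs
  induction xs with
  | nil => intro d; rfl
  | cons x xs ih =>
      intro d
      simp only [List.foldl_cons, List.reverse_cons, List.find?_append]
      rw [ih]
      cases h : xs.reverse.find? P with
      | some q => simp
      | none => by_cases hx : P x <;> simp [hx]

-- find? respects pointwise-equal predicates on the list's members
theorem pred_congr_find? {α : Type} {p q : α → Bool} :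
    ∀ (xs : List α), (∀ a ∈ xs, p a = q a) → xs.find? p = xs.find? q := by
  intro xs
  induction xs with
  | nil => intro _; rfl
  | cons x xs ih =>
      intro h
      simp only [List.find?_cons, h x (by simp)]
      cases hq : q x
      · exact ih (fun a ha => h a (by simp [ha]))
      · rfl

-- the forward row-major last-write scan of one letter equals B's backward flat search
theorem slot_eq (l : String) (shifur : List (List String)) :
    ((PySem.List.pyRange 0 5 1).flatMap (fun i => (PySem.List.pyRange 0 5 1).map (fun j => (i, j)))).foldl
        (fun (a : List Int) (p : Int × Int) =>
          if PySem.List.pyGetD (PySem.List.pyGetD shifur p.1 []) p.2 "" == l then [p.1, p.2] else a) []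
      = (match (PySem.List.pyRange 24 (-1) (-1)).find? (fun k =>
            PySem.List.pyGetD ((PySem.List.pyRange 0 5 1).flatMap (fun i =>
              (PySem.List.pyRange 0 5 1).map (fun j =>
                PySem.List.pyGetD (PySem.List.pyGetD shifur i []) j ""))) k "" == l) with
         | some k => [PySem.Int.floordiv k 5, PySem.Int.mod k 5]
         | none => ([] : List Int)) := by
  rw [foldl_ite_eq_find?_reverse]
  have hrev : ((PySem.List.pyRange 0 5 1).flatMap (fun i =>
        (PySem.List.pyRange 0 5 1).map (fun j => ((i : Int), (j : Int))))).reverse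
      = (PySem.List.pyRange 24 (-1) (-1)).map
          (fun k => (PySem.Int.floordiv k 5, PySem.Int.mod k 5)) := by decide
  rw [hrev, List.find?_map]
  have hpred : ∀ k ∈ PySem.List.pyRange 24 (-1) (-1),
      ((fun (p : Int × Int) => PySem.List.pyGetD (PySem.List.pyGetD shifur p.1 []) p.2 "" == l) ∘
        (fun k => (PySem.Int.floordiv k 5, PySem.Int.mod k 5))) k
      = (PySem.List.pyGetD ((PySem.List.pyRange 0 5 1).flatMap (fun i =>
            (PySem.List.pyRange 0 5 1).map (fun j =>
              PySem.List.pyGetD (PySem.List.pyGetD shifur i []) j ""))) k "" == l) := by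
    intro k hk
    have h24 : PySem.List.pyRange 24 (-1) (-1)
        = [24, 23, 22, 21, 20, 19, 18, 17, 16, 15, 14, 13, 12, 11, 10, 9, 8, 7, 6, 5, 4, 3, 2, 1, 0] := by decide
    rw [h24] at hk
    fin_cases hk <;> rfl
  rw [pred_congr_find? _ hpred]
  cases h : (PySem.List.pyRange 24 (-1) (-1)).find? (fun k =>
      PySem.List.pyGetD ((PySem.List.pyRange 0 5 1).flatMap (fun i =>
        (PySem.List.pyRange 0 5 1).map (fun j =>
          PySem.List.pyGetD (PySem.List.pyGetD shifur i []) j ""))) k "" == l) with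
  | none => rfl
  | some k => rfl

-- ===== VERDICT (by name: the statement is the Claim_ definition above) =====
theorem find_spec : Claim_equal_find := by
  intro l1 l2 shifur _ _
  unfold Spec_find find find_alt
  rw [foldl_foldl_flatMap (fun (coords : List Int × List Int) (p : Int × Int) =>
        let cell := PySem.List.pyGetD (PySem.List.pyGetD shifur p.1 []) p.2 ""
        let coords := if cell == l1 then ([p.1, p.2], coords.2) else coords
        if cell == l2 then (coords.1, [p.1, p.2]) else coords)]
  have hfun : (fun (coords : List Int × List Int) (p : Int × Int) =>
        let cell := PySem.List.pyGetD (PySem.List.pyGetD shifur p.1 []) p.2 ""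
        let coords := if cell == l1 then ([p.1, p.2], coords.2) else coords
        if cell == l2 then (coords.1, [p.1, p.2]) else coords)
      = (fun (coords : List Int × List Int) (p : Int × Int) =>
          (if PySem.List.pyGetD (PySem.List.pyGetD shifur p.1 []) p.2 "" == l1 then [p.1, p.2] else coords.1,
           if PySem.List.pyGetD (PySem.List.pyGetD shifur p.1 []) p.2 "" == l2 then [p.1, p.2] else coords.2)) := by
    funext coords p
    by_cases h1 : PySem.List.pyGetD (PySem.List.pyGetD shifur p.1 []) p.2 "" == l1 <;>
      by_cases h2 : PySem.List.pyGetD (PySem.List.pyGetD shifur p.1 []) p.2 "" == l2 <;>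
        simp [h1, h2]
  rw [hfun, fold_prod_split]
  exact congrArg₂ (fun a b => [a, b]) (slot_eq l1 shifur) (slot_eq l2 shifur)
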